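-- pv_equiv track=rewrite | github.com/luishenrique456/TDS_3 | DOT (desenvolvimento_orientado_teste)/lista 2/q1.py | lista_par
-- ===== SOURCE A (Python) =====
-- def lista_par(list_num : list[int])-> list[int]:
--     num_par = []
--     num_impar = []
--     for i in range(len(list_num)):
--         if  i % 2  == 0:
--             num_par.append(i)
--         else:
--             num_impar.append(i)
--
--     cont_impar = 0
--
--     for i in range(len(num_impar)):
--         cont_impar +=1
--
--     cont_par = 0
--     for i in range(len(num_par)):
--         cont_par += 1
--
--     return f'Lista de número pares : {num_par}\nQuantidade de números pares : {cont_par}\nLista de números impar : {num_impar}\nQuantidade de número impares : {cont_impar}'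
-- ===== SOURCE B (Python) =====
-- def lista_par(list_num: list[int]) -> str:
--     num_par = list(range(0, len(list_num), 2))
--     num_impar = list(range(1, len(list_num), 2))
--     return f'Lista de número pares : {num_par}\nQuantidade de números pares : {len(num_par)}\nLista de números impar : {num_impar}\nQuantidade de número impares : {len(num_impar)}'
-- ===== Notes on version B (the rewrite author's own statement) =====
-- stated objective: simpler
-- what changed: Replaces the index-parity classification loop and the two count-up loops by directly constructing the index lists as stepped ranges range(0,n,2)/range(1,n,2) and taking their len(), keeping the same output string.
import Mathlib
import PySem

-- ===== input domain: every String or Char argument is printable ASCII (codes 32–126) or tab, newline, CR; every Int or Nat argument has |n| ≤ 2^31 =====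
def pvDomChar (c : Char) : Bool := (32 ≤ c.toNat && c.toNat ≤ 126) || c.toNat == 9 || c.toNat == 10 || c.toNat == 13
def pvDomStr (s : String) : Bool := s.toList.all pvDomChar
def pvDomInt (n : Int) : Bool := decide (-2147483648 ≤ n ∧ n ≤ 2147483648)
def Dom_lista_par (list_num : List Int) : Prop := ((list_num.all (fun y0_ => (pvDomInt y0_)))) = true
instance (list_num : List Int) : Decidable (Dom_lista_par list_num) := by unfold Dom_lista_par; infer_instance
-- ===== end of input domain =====

-- B replaces A's index-parity loop and the two counting loops by two stepped ranges and their lengths (objective: simpler).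

-- Python's repr of a list of ints, as interpolated by the f-string (shared formatting helper)
def pyIntListRepr (xs : List Int) : String :=
  "[" ++ PySem.Str.join ", " (xs.map PySem.Int.toStr) ++ "]"

-- ===== PORT A =====
def lista_par (list_num : List Int) : String :=
  let n : Int := (list_num.length : Int)
  let s := (PySem.List.pyRange 0 n 1).foldl
      (fun (s : List Int × List Int) i =>
        if PySem.Int.mod i 2 == 0 then (s.1 ++ [i], s.2) else (s.1, s.2 ++ [i]))
      ([], [])
  let num_par := s.1
  let num_impar := s.2
  let cont_impar : Int :=
    (PySem.List.pyRange 0 (num_impar.length : Int) 1).foldl (fun c _ => c + 1) 0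
  let cont_par : Int :=
    (PySem.List.pyRange 0 (num_par.length : Int) 1).foldl (fun c _ => c + 1) 0
  "Lista de número pares : " ++ pyIntListRepr num_par ++
    "\nQuantidade de números pares : " ++ PySem.Int.toStr cont_par ++
    "\nLista de números impar : " ++ pyIntListRepr num_impar ++
    "\nQuantidade de número impares : " ++ PySem.Int.toStr cont_impar

-- ===== PORT B =====
def lista_par_alt (list_num : List Int) : String :=
  let n : Int := (list_num.length : Int)
  let num_par := PySem.List.pyRange 0 n 2
  let num_impar := PySem.List.pyRange 1 n 2
  "Lista de número pares : " ++ pyIntListRepr num_par ++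
    "\nQuantidade de números pares : " ++ PySem.Int.toStr (num_par.length : Int) ++
    "\nLista de números impar : " ++ pyIntListRepr num_impar ++
    "\nQuantidade de número impares : " ++ PySem.Int.toStr (num_impar.length : Int)

-- ===== PRECONDITION & SPEC =====
def Spec_lista_par (list_num : List Int) (out : String) : Prop := out = lista_par_alt list_num
instance (list_num : List Int) (out : String) : Decidable (Spec_lista_par list_num out) := by unfold Spec_lista_par; infer_instance

-- ===== CLAIM (what is proved, stated in full; the proofs are below) =====
def Claim_equal_lista_par : Prop := ∀ (list_num : List Int), Dom_lista_par list_num → Spec_lista_par list_num (lista_par list_num)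

-- ===== LEMMAS AND PROOFS =====

-- A's single parity loop over a pair accumulator is a pair of filters
lemma foldl_pair_filter (p : Int → Bool) :
    ∀ (l a1 a2 : List Int),
      l.foldl (fun (s : List Int × List Int) i =>
          if p i then (s.1 ++ [i], s.2) else (s.1, s.2 ++ [i])) (a1, a2)
        = (a1 ++ l.filter p, a2 ++ l.filter (fun i => !p i)) := by
  intro l
  induction l with
  | nil => intro a1 a2; simp
  | cons x xs ih =>
      intro a1 a2
      by_cases h : p x = true <;> simp [List.foldl_cons, h, ih]

-- two strictly increasing lists with the same members are equal
lemma eq_of_mem_iff_pairwise_lt {l l' : List Int}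
    (hmem : ∀ x, x ∈ l ↔ x ∈ l')
    (h1 : List.Pairwise (· < ·) l) (h2 : List.Pairwise (· < ·) l') : l = l' := by
  have n1 : l.Nodup := h1.imp (fun h => ne_of_lt h)
  have n2 : l'.Nodup := h2.imp (fun h => ne_of_lt h)
  exact List.Perm.eq_of_pairwise (fun a b _ _ h h' => absurd h' (not_lt_of_gt h)) h1 h2
    ((List.perm_ext_iff_of_nodup n1 n2).mpr hmem)

lemma pairwise_lt_pyRange_two (a b : Int) :
    List.Pairwise (· < ·) (PySem.List.pyRange a b 2) := by
  rw [PySem.List.pyRange_of_pos a b (by norm_num)]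
  refine List.Pairwise.map _ (fun x y h => ?_) (List.pairwise_lt_range)
  omega

lemma evens_eq (n : Int) :
    (PySem.List.pyRange 0 n 1).filter (fun i => PySem.Int.mod i 2 == 0)
      = PySem.List.pyRange 0 n 2 := by
  refine eq_of_mem_iff_pairwise_lt (fun x => ?_)
    ((PySem.List.pairwise_lt_pyRange_one 0 n).filter _) (pairwise_lt_pyRange_two 0 n)
  rw [List.mem_filter, PySem.List.mem_pyRange_iff_of_pos (by norm_num : (0:Int) < 2)]
  simp only [PySem.List.mem_pyRange_one, beq_iff_eq]
  rw [PySem.Int.mod_eq_emod_of_pos (by norm_num : (0:Int) < 2)]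
  omega

lemma odds_eq (n : Int) :
    (PySem.List.pyRange 0 n 1).filter (fun i => !(PySem.Int.mod i 2 == 0))
      = PySem.List.pyRange 1 n 2 := by
  refine eq_of_mem_iff_pairwise_lt (fun x => ?_)
    ((PySem.List.pairwise_lt_pyRange_one 0 n).filter _) (pairwise_lt_pyRange_two 1 n)
  rw [List.mem_filter, PySem.List.mem_pyRange_iff_of_pos (by norm_num : (0:Int) < 2)]
  simp only [PySem.List.mem_pyRange_one, Bool.not_eq_eq_eq_not, Bool.not_true, beq_eq_false_iff_ne,
    ne_eq]
  rw [PySem.Int.mod_eq_emod_of_pos (by norm_num : (0:Int) < 2)]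
  omega

-- the counting loop 'for i in range(len(l)): cont += 1' is the length
lemma count_loop_eq (m : Nat) :
    (PySem.List.pyRange 0 (m : Int) 1).foldl (fun c _ => c + 1) (0 : Int) = (m : Int) := by
  rw [PySem.List.foldl_add _ (fun _ => (1 : Int)) 0]
  simp [PySem.List.length_pyRange_one]

-- ===== VERDICT (by name: the statement is the Claim_ definition above) =====
theorem lista_par_spec : Claim_equal_lista_par := by
  intro xs _
  unfold Spec_lista_par lista_par lista_par_alt
  simp only [foldl_pair_filter, List.nil_append, evens_eq, odds_eq, count_loop_eq]
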